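-- pv_equiv track=rewrite | github.com/sredhavainban/phisig-decter | AI_Cyber_Security_Platform/services/spam_service.py | _rule_based_spam
-- ===== SOURCE A (Python) =====
-- def _rule_based_spam(text: str) -> bool:
--     if not text:
--         return False
--     s = text.lower()
--     spam_terms = ['win', 'won', 'congrat', 'free', 'prize', 'click here', 'unsubscribe', 'money', 'credit card']
--     score = 0
--     for t in spam_terms:
--         if t in s:
--             score += 1
--     return score >= 1
-- ===== SOURCE B (Python) =====
-- def _rule_based_spam(text: str) -> bool:
--     # Single left-to-right scan: at each position test whether any spam term
--     # starts there (str.startswith with a tuple), instead of one substring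
--     # search per term over the whole text.
--     terms = ('win', 'won', 'congrat', 'free', 'prize', 'click here',
--              'unsubscribe', 'money', 'credit card')
--     s = text.lower()
--     for i in range(len(s)):
--         if s.startswith(terms, i):
--             return True
--     return False
-- ===== Notes on version B (the rewrite author's own statement) =====
-- stated objective: alternative
-- what changed: Replaced the per-term loop of whole-text substring searches (plus count-then-threshold accumulator and empty-text guard) by a single left-to-right scan over positions that tests at each position whether any term starts there.
import Mathlib
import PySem

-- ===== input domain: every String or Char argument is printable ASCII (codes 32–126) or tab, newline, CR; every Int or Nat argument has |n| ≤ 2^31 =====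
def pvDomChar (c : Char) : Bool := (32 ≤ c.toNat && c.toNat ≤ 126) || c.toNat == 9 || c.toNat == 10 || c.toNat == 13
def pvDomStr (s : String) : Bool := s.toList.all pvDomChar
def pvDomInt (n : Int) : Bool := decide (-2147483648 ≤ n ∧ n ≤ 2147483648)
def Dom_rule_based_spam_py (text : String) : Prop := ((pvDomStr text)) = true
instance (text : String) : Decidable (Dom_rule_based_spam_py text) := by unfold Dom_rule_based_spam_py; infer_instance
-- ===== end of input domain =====

-- B replaces A's per-term substring searches (with a count accumulator) by one
-- left-to-right scan testing at each position whether any term starts there (objective: alternative).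

-- ===== PORT A =====
def pvSpamTerms : List String :=
  ["win", "won", "congrat", "free", "prize", "click here", "unsubscribe", "money", "credit card"]

def rule_based_spam_py (text : String) : Bool :=
  if text.toList = [] then false
  else
    let s := PySem.Str.lower text
    let score := pvSpamTerms.foldl (fun sc t => if PySem.Str.isIn t s then sc + 1 else sc) 0
    decide (score ≥ 1)

-- ===== PORT B =====
def pvSpamTermsB : List (List Char) :=
  ["win", "won", "congrat", "free", "prize", "click here", "unsubscribe", "money", "credit card"].map String.toList

-- positional scan: "for i: if s.startswith(terms, i): return True" — at each suffix,
-- does some term start here, else continue ( || = return-True-or-keep-scanning)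
def pvScan : List Char → Bool
  | [] => false
  | c :: rest => pvSpamTermsB.any (fun t => PySem.Chars.startswith (c :: rest) t) || pvScan rest

def rule_based_spam_py_alt (text : String) : Bool :=
  pvScan (PySem.Str.lower text).toList

-- ===== PRECONDITION & SPEC =====
def Spec_rule_based_spam_py (text : String) (out : Bool) : Prop := out = rule_based_spam_py_alt text
instance (text : String) (out : Bool) : Decidable (Spec_rule_based_spam_py text out) := by unfold Spec_rule_based_spam_py; infer_instance

-- ===== CLAIM (what is proved, stated in full; the proofs are below) =====
def Claim_equal_rule_based_spam_py : Prop := ∀ (text : String), Dom_rule_based_spam_py text → Spec_rule_based_spam_py text (rule_based_spam_py text)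

-- ===== LEMMAS AND PROOFS =====

-- A's score loop is ≥ 1 iff some term satisfies the test.
theorem pvFoldlScore (ts : List String) (p : String → Bool) (n : Nat) :
    (1 ≤ ts.foldl (fun sc t => if p t then sc + 1 else sc) n)
      ↔ (1 ≤ n ∨ ∃ t ∈ ts, p t = true) := by
  induction ts generalizing n with
  | nil => simp
  | cons t ts ih =>
      rw [List.foldl_cons, ih]
      cases hp : p t with
      | true =>
          simp only [if_true, List.mem_cons]
          constructor
          · intro _; exact Or.inr ⟨t, Or.inl rfl, hp⟩
          · intro _; exact Or.inl (by omega)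
      | false =>
          simp only [Bool.false_eq_true, if_false, List.mem_cons]
          constructor
          · rintro (hn | ⟨u, hu, hpu⟩)
            · exact Or.inl hn
            · exact Or.inr ⟨u, Or.inr hu, hpu⟩
          · rintro (hn | ⟨u, (rfl | hu), hpu⟩)
            · exact Or.inl hn
            · exact absurd hpu (by simp [hp])
            · exact Or.inr ⟨u, hu, hpu⟩

theorem pvTermsB_ne_nil : ∀ t ∈ pvSpamTermsB, t ≠ [] := by decide

-- B's scan succeeds iff some term is a prefix of some suffix.
theorem pvScan_iff (l : List Char) :
    pvScan l = true ↔ ∃ j, ∃ t ∈ pvSpamTermsB, t <+: l.drop j := by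
  induction l with
  | nil =>
      constructor
      · intro h; simp [pvScan] at h
      · rintro ⟨j, t, ht, hp⟩
        rw [List.drop_nil] at hp
        exact absurd (List.prefix_nil.mp hp) (pvTermsB_ne_nil t ht)
  | cons c rest ih =>
      rw [pvScan, Bool.or_eq_true, ih, List.any_eq_true]
      constructor
      · rintro (⟨t, ht, hs⟩ | ⟨j, t, ht, hp⟩)
        · exact ⟨0, t, ht, (PySem.Chars.startswith_iff _ _).mp hs⟩
        · exact ⟨j + 1, t, ht, by simpa using hp⟩
      · rintro ⟨j, t, ht, hp⟩
        cases j with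
        | zero => exact Or.inl ⟨t, ht, (PySem.Chars.startswith_iff _ _).mpr (by simpa using hp)⟩
        | succ j => exact Or.inr ⟨j, t, ht, by simpa using hp⟩

-- B's scan, restated as "some term occurs in s".
theorem pvScan_iff_isIn (s : String) :
    pvScan s.toList = true ↔ ∃ t ∈ pvSpamTerms, PySem.Str.isIn t s = true := by
  rw [pvScan_iff]
  constructor
  · rintro ⟨j, t, ht, hp⟩
    rcases List.mem_map.mp ht with ⟨u, hu, rfl⟩
    have h1 : PySem.Chars.isIn u.toList s.toList = true :=
      (PySem.Chars.exists_prefix_drop_iff_isIn _ _).mp ⟨j, hp⟩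
    exact ⟨u, hu, (PySem.Str.isIn_iff_infix _ _).mpr ((PySem.Chars.isIn_iff_infix _ _).mp h1)⟩
  · rintro ⟨u, hu, hin⟩
    have h1 : PySem.Chars.isIn u.toList s.toList = true :=
      (PySem.Chars.isIn_iff_infix _ _).mpr ((PySem.Str.isIn_iff_infix _ _).mp hin)
    rcases (PySem.Chars.exists_prefix_drop_iff_isIn _ _).mpr h1 with ⟨j, hp⟩
    exact ⟨j, u.toList, List.mem_map.mpr ⟨u, hu, rfl⟩, hp⟩

-- ===== VERDICT (by name: the statement is the Claim_ definition above) =====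
theorem rule_based_spam_py_spec : Claim_equal_rule_based_spam_py := by
  intro text _
  unfold Spec_rule_based_spam_py rule_based_spam_py rule_based_spam_py_alt
  by_cases hemp : text.toList = []
  · have hl : (PySem.Str.lower text).toList = [] := by
      rw [PySem.Str.toList_lower, hemp]; rfl
    rw [if_pos hemp, hl]
    rfl
  · rw [if_neg hemp, Bool.eq_iff_iff]
    simp only [decide_eq_true_eq, ge_iff_le]
    rw [pvFoldlScore, pvScan_iff_isIn]
    constructor
    · rintro (hn | h)
      · omega
      · exact h
    · intro h; exact Or.inr h
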